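-- pv_equiv track=rewrite | github.com/GabrieleFerrero/Universita | ANNO 2022-2023/Informatica/python/76-somma_senza_il_minimo/main.py | sum_without_smallest
-- ===== SOURCE A (Python) =====
-- def sum_without_smallest(v):
--     min = v[0]
--     for num in v:
--         if num < min: min = num
--
--     somma = 0
--     for num in v:
--         if num != min: somma += num
--
--     return somma
-- ===== SOURCE B (Python) =====
-- def sum_without_smallest(v):
--     s = sorted(v)
--     i = 1
--     while i < len(s) and s[i] == s[0]:
--         i += 1
--     return sum(s[i:])
-- ===== Notes on version B (the rewrite author's own statement) =====
-- stated objective: alternative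
-- what changed: B sorts the list and sums the suffix after the leading run of minima, instead of A's two scans (running min, then filtering sum).
import Mathlib
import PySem

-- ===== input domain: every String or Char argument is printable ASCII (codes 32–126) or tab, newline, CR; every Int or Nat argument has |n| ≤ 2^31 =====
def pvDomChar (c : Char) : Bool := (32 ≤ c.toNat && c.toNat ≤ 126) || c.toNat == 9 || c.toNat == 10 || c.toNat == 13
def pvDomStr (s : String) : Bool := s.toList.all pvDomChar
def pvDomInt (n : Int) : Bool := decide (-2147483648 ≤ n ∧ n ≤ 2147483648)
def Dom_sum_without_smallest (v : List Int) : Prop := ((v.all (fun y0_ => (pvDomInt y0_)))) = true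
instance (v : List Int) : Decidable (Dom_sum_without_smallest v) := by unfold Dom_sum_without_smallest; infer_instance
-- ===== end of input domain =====

-- B sorts the list and sums the suffix after the leading run of minima, instead of A's two scans (alternative decomposition, not faster).


-- ===== PORT A =====
def sum_without_smallest (v : List Int) : Int :=
  match v with
  | [] => 0  -- Python raises IndexError on v[0]; excluded by Pre_
  | h :: _ =>
    let m := v.foldl (fun m num => if num < m then num else m) h
    v.foldl (fun somma num => if num ≠ m then somma + num else somma) 0

-- ===== PORT B =====
-- B's while loop: skip the leading run of elements equal to the head of the sorted list.
def pvSkipEq (m : Int) : List Int → List Int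
  | [] => []
  | x :: t => if x = m then pvSkipEq m t else x :: t

def sum_without_smallest_alt (v : List Int) : Int :=
  match PySem.List.sorted v (fun x => x) false with
  | [] => 0  -- sum(s[1:]) with empty s; A raises on [] (excluded by Pre_)
  | h :: t => (pvSkipEq h t).sum

-- ===== PRECONDITION & SPEC =====
-- A raises IndexError on the empty list (v[0]); excluded.
def Pre_sum_without_smallest (v : List Int) : Prop := v ≠ []
instance (v : List Int) : Decidable (Pre_sum_without_smallest v) := by unfold Pre_sum_without_smallest; infer_instance
def pvWitness_sum_without_smallest : List Int := [3, 1, 2, 1]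

def Spec_sum_without_smallest (v : List Int) (out : Int) : Prop := out = sum_without_smallest_alt v
instance (v : List Int) (out : Int) : Decidable (Spec_sum_without_smallest v out) := by unfold Spec_sum_without_smallest; infer_instance

-- ===== CLAIM =====
def Claim_equal_sum_without_smallest : Prop := ∀ (v : List Int), Dom_sum_without_smallest v → Pre_sum_without_smallest v → Spec_sum_without_smallest v (sum_without_smallest v)

-- ===== LEMMAS AND PROOFS =====

-- A's filtering sum equals total minus count·m.
theorem pv_filter_sum (m : Int) (v : List Int) (s : Int) :
    v.foldl (fun somma num => if num ≠ m then somma + num else somma) s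
      = s + v.sum - (v.count m : Int) * m := by
  induction v generalizing s with
  | nil => simp
  | cons a t ih =>
    rw [List.foldl_cons]
    by_cases h : a = m
    · rw [if_neg (by simp [h]), ih, List.count_cons]
      subst h; simp; ring
    · rw [if_pos h, ih, List.count_cons]
      simp only [List.sum_cons]
      have hb : (a == m) = false := by simp [h]
      rw [hb]; simp; ring

-- A's running-min fold: ≤ every element and ≤ the seed, and is the seed or an element.
theorem pv_foldl_min_le (v : List Int) (a : Int) :
    (∀ x ∈ v, v.foldl (fun m num => if num < m then num else m) a ≤ x)
    ∧ v.foldl (fun m num => if num < m then num else m) a ≤ a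
    ∧ (v.foldl (fun m num => if num < m then num else m) a = a
       ∨ v.foldl (fun m num => if num < m then num else m) a ∈ v) := by
  induction v generalizing a with
  | nil => simp
  | cons x t ih =>
    simp only [List.foldl_cons]
    by_cases h : x < a
    · rw [if_pos h]
      obtain ⟨h1, h2, h3⟩ := ih x
      refine ⟨?_, le_trans h2 (le_of_lt h), ?_⟩
      · intro y hy
        rcases List.mem_cons.mp hy with rfl | hy
        · exact h2
        · exact h1 y hy
      · rcases h3 with he | hm
        · exact Or.inr (by simp [he])
        · exact Or.inr (List.mem_cons_of_mem _ hm)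
    · rw [if_neg h]
      obtain ⟨h1, h2, h3⟩ := ih a
      refine ⟨?_, h2, ?_⟩
      · intro y hy
        rcases List.mem_cons.mp hy with rfl | hy
        · exact le_trans h2 (le_of_not_gt h)
        · exact h1 y hy
      · rcases h3 with he | hm
        · exact Or.inl he
        · exact Or.inr (List.mem_cons_of_mem _ hm)

-- On a sorted (pairwise ≤) tail whose elements are all ≥ m, skipping the run of m's
-- subtracts exactly count(m)·m from the sum.
theorem pv_skip_sum (m : Int) (t : List Int)
    (hs : t.Pairwise (fun a b => a ≤ b)) (hge : ∀ x ∈ t, m ≤ x) :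
    (pvSkipEq m t).sum = t.sum - (t.count m : Int) * m := by
  induction t with
  | nil => simp [pvSkipEq]
  | cons x r ih =>
    rw [pvSkipEq]
    by_cases h : x = m
    · subst h
      rw [if_pos rfl, ih (List.Pairwise.sublist (List.sublist_cons_self _ _) hs)
            (fun y hy => hge y (List.mem_cons_of_mem _ hy))]
      simp
      ring
    · rw [if_neg h]
      have hgt : m < x := lt_of_le_of_ne (hge x (List.mem_cons_self)) (Ne.symm h)
      have hc : (x :: r).count m = 0 := by
        rw [List.count_eq_zero]
        intro hm
        rcases List.mem_cons.mp hm with rfl | hm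
        · exact h rfl
        · have := (List.pairwise_cons.mp hs).1 m hm
          omega
      rw [hc]; simp

-- ===== VERDICT =====
theorem sum_without_smallest_spec : Claim_equal_sum_without_smallest := by
  intro v _ hpre
  unfold Spec_sum_without_smallest
  match hv : v with
  | [] => exact absurd rfl hpre
  | a :: t0 =>
    cases hs : PySem.List.sorted (a :: t0) (fun x => x) false with
    | nil =>
      exact absurd ((PySem.List.sorted_eq_nil_iff _ _ _).mp hs) (by simp)
    | cons h t =>
      have hB : sum_without_smallest_alt (a :: t0) = (pvSkipEq h t).sum := by
        unfold sum_without_smallest_alt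
        rw [hs]
      have hA : sum_without_smallest (a :: t0)
          = List.foldl
              (fun somma num =>
                if num ≠ List.foldl (fun m num => if num < m then num else m) a (a :: t0)
                then somma + num else somma) 0 (a :: t0) := by
        simp only [sum_without_smallest]
      rw [hA, hB, pv_filter_sum]
      set m := (a :: t0).foldl (fun m num => if num < m then num else m) a with hmdef
      -- h = m : both are the minimum of v
      have hperm : (h :: t).Perm (a :: t0) := hs ▸ PySem.List.sorted_perm _ _ _
      have hpw : (h :: t).Pairwise (fun x y => x ≤ y) := by
        have := PySem.List.sorted_pairwise (a :: t0) (fun x => x) (κ := Int)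
        rw [hs] at this; exact this
      obtain ⟨hle, _, hmem⟩ := pv_foldl_min_le (a :: t0) a
      have hhead : ∀ y ∈ (a :: t0), h ≤ y :=
        PySem.List.key_head_sorted_le (a :: t0) (fun x => x) hs
      have hm_mem : m ∈ (a :: t0) := by
        rcases hmem with he | hm
        · rw [← hmdef] at he; rw [he]; exact List.mem_cons_self
        · exact hm
      have hh_mem : h ∈ (a :: t0) := hperm.mem_iff.mp List.mem_cons_self
      have hme : h = m := le_antisymm (hhead m hm_mem) (hle h hh_mem)
      have hge : ∀ x ∈ t, h ≤ x := fun x hx => (List.pairwise_cons.mp hpw).1 x hx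
      rw [pv_skip_sum h t (List.pairwise_cons.mp hpw).2 hge, ← hme]
      have hsum : h + t.sum = (a :: t0).sum := by
        have := hperm.sum_eq; simpa using this
      have hcount : (h :: t).count h = (a :: t0).count h := hperm.count_eq h
      have hcc : (t.count h : Int) = ((a :: t0).count h : Int) - 1 := by
        rw [← hcount]; simp
      rw [hcc]
      have : (a :: t0).sum = h + t.sum := hsum.symm
      rw [this]
      ring
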